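-- pv_equiv track=rewrite | github.com/IceMage144/ScrapyCrawlers | Crawler/spiders/dic_spider.py | verbParse
-- ===== SOURCE A (Python) =====
-- verbForms = ["third-person singular simple present", "present participle",
--              "simple past", "past participle"]
--
-- numbers = ["0", "1", "2", "3", "4", "5", "6", "7", "8", "9"]
--
-- def verbParse(s):
--     stk = []
--     res = {}
--     for c, i in zip(verbForms, range(4)):
--         s = s.replace(c, str(i))
--     v = s.replace("and ", "").split(" ")
--     mark = True
--     for i in v:
--         if i in numbers:
--             stk.append(i)
--             mark = False
--         else:
--             if mark == True:
--                 continue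
--             for el in stk:
--                 res[verbForms[int(el)]] = i
--             stk = []
--             mark = True
--     return res
-- ===== SOURCE B (Python) =====
-- verbForms = ["third-person singular simple present", "present participle",
--              "simple past", "past participle"]
--
-- numbers = ["0", "1", "2", "3", "4", "5", "6", "7", "8", "9"]
--
-- def verbParse(s):
--     for i, c in enumerate(verbForms):
--         s = s.replace(c, str(i))
--     tokens = s.replace("and ", "").split(" ")
--     # backward pass: nearest non-digit token strictly after each position
--     nxt = [None] * len(tokens)
--     following = None
--     for i in range(len(tokens) - 1, -1, -1):
--         nxt[i] = following
--         if tokens[i] not in numbers: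
--             following = tokens[i]
--     # forward pass: every digit token is assigned the word that follows it
--     res = {}
--     for t, w in zip(tokens, nxt):
--         if t in numbers and w is not None:
--             res[verbForms[int(t)]] = w
--     return res
-- ===== Notes on version B (the rewrite author's own statement) =====
-- stated objective: alternative
-- what changed: Replaced A's single-pass stack+mark state machine by two staged passes: a backward scan precomputing for each token the nearest following non-digit token, then a forward pass assigning each digit token that precomputed word.
import Mathlib
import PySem

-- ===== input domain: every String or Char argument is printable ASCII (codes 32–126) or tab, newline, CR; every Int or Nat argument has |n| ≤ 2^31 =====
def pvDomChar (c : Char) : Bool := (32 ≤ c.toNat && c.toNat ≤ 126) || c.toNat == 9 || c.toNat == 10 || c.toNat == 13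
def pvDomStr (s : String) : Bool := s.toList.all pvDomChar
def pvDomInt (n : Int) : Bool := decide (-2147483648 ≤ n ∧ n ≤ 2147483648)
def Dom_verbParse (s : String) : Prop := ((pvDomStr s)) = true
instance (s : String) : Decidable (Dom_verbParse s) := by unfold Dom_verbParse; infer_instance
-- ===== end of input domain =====

-- B replaces A's single-pass stack+mark state machine by two staged passes (a backward
-- scan computing each token's nearest following word, then a forward assignment pass).

-- ===== PORT A =====
def pvVerbFormsA : List String :=
  ["third-person singular simple present", "present participle", "simple past", "past participle"]

def pvNumbersA : List String := ["0","1","2","3","4","5","6","7","8","9"]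

-- for el in stk: res[verbForms[int(el)]] = i   (pyGet? = none exactly where A raises IndexError, outside Pre_)
def pvFlushA (res : PySem.Dict String String) (stk : List String) (w : String) : PySem.Dict String String :=
  stk.foldl (fun r el =>
    match PySem.List.pyGet? pvVerbFormsA ((PySem.Int.ofStr? el).getD 0) with
    | some f => r.insert f w
    | none => r) res

def pvLoopA : List String → List String × PySem.Dict String String × Bool → PySem.Dict String String
  | [], (_, res, _) => res
  | i :: v, (stk, res, mark) =>
    if i ∈ pvNumbersA then pvLoopA v (stk ++ [i], res, false)
    else if mark then pvLoopA v (stk, res, mark)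
    else pvLoopA v ([], pvFlushA res stk i, true)

def verbParse (s : String) : List (String × String) :=
  (pvLoopA
    ((PySem.Str.split? (PySem.Str.replace
        ((List.zip pvVerbFormsA (PySem.List.pyRange 0 4 1)).foldl
          (fun s ci => PySem.Str.replace s ci.1 (PySem.Int.toStr ci.2)) s)
        "and " "") " ").getD [])
    ([], PySem.Dict.empty, true)).items

-- ===== PORT B =====
def pvVerbFormsB : List String :=
  ["third-person singular simple present", "present participle", "simple past", "past participle"]

def pvNumbersB : List String := ["0","1","2","3","4","5","6","7","8","9"]

-- res[verbForms[int(t)]] = w   (pyGet? = none exactly where B raises IndexError, outside Pre_)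
def pvStep1B (r : PySem.Dict String String) (t w : String) : PySem.Dict String String :=
  match PySem.List.pyGet? pvVerbFormsB ((PySem.Int.ofStr? t).getD 0) with
  | some f => r.insert f w
  | none => r

-- backward pass: .1 = current 'following', .2 = the nxt list
def pvNextB : List String → Option String × List (Option String)
  | [] => (none, [])
  | t :: ts =>
    let p := pvNextB ts
    ((if t ∈ pvNumbersB then p.1 else some t), p.1 :: p.2)

-- forward pass step over zip(tokens, nxt)
def pvAssignStepB (r : PySem.Dict String String) (tw : String × Option String) : PySem.Dict String String :=
  if tw.1 ∈ pvNumbersB then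
    match tw.2 with
    | some w => pvStep1B r tw.1 w
    | none => r
  else r

def pvToksB (s : String) : List String :=
  (PySem.Str.split? (PySem.Str.replace
      ((PySem.List.enumerate pvVerbFormsB).foldl
        (fun s ic => PySem.Str.replace s ic.2 (PySem.Int.toStr ic.1)) s)
      "and " "") " ").getD []

def verbParse_alt (s : String) : List (String × String) :=
  ((List.zip (pvToksB s) (pvNextB (pvToksB s)).2).foldl pvAssignStepB PySem.Dict.empty).items

-- ===== PRECONDITION & SPEC =====
def pvPreForms : List String :=
  ["third-person singular simple present", "present participle", "simple past", "past participle"]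

def pvPreToks (s : String) : List String :=
  (PySem.Str.split? (PySem.Str.replace
      ((PySem.List.enumerate pvPreForms).foldl
        (fun s ic => PySem.Str.replace s ic.2 (PySem.Int.toStr ic.1)) s)
      "and " "") " ").getD []

-- Pre_ excludes exactly the inputs on which A raises IndexError: a token "4".."9" followed by some
-- later non-digit token is flushed through verbForms[int(el)] with an index past the 4-element list.
def Pre_verbParse (s : String) : Prop :=
  ∀ i < (pvPreToks s).length, (pvPreToks s).getD i "" ∈ (["4","5","6","7","8","9"] : List String) →
    ∀ j < (pvPreToks s).length, i < j →
      (pvPreToks s).getD j "" ∈ (["0","1","2","3","4","5","6","7","8","9"] : List String)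

instance (s : String) : Decidable (Pre_verbParse s) := by unfold Pre_verbParse; infer_instance

def pvWitness_verbParse : String := "0 ran and 2 3 kept"

def Spec_verbParse (s : String) (out : List (String × String)) : Prop := out = verbParse_alt s
instance (s : String) (out : List (String × String)) : Decidable (Spec_verbParse s out) := by unfold Spec_verbParse; infer_instance

-- ===== CLAIM (what is proved, stated in full; the proofs are below) =====
def Claim_equal_verbParse : Prop := ∀ (s : String), Dom_verbParse s → Pre_verbParse s → Spec_verbParse s (verbParse s)

-- ===== LEMMAS AND PROOFS =====

theorem pv_flush_single (res : PySem.Dict String String) (t w : String) :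
    pvFlushA res [t] w = pvStep1B res t w := rfl

theorem pv_flush_append (res : PySem.Dict String String) (stk : List String) (t w : String) :
    pvFlushA res (stk ++ [t]) w = pvStep1B (pvFlushA res stk w) t w := by
  simp only [pvFlushA, List.foldl_append, List.foldl_cons, List.foldl_nil]
  rfl

-- core: A's state machine equals B's zip-with-next fold
theorem pv_main : ∀ ts : List String,
    (∀ res, pvLoopA ts ([], res, true) =
      (List.zip ts (pvNextB ts).2).foldl pvAssignStepB res) ∧
    (∀ stk res, stk ≠ [] → pvLoopA ts (stk, res, false) =
      (List.zip ts (pvNextB ts).2).foldl pvAssignStepB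
        (match (pvNextB ts).1 with
         | none => res
         | some w => pvFlushA res stk w)) := by
  intro ts
  induction ts with
  | nil =>
    refine ⟨fun res => rfl, fun stk res hstk => ?_⟩
    cases stk with
    | nil => exact absurd rfl hstk
    | cons a l => rfl
  | cons t ts ih =>
    obtain ⟨ih1, ih2⟩ := ih
    have hnext : pvNextB (t :: ts) =
        ((if t ∈ pvNumbersB then (pvNextB ts).1 else some t),
         (pvNextB ts).1 :: (pvNextB ts).2) := rfl
    constructor
    · intro res
      by_cases h : t ∈ pvNumbersA
      · have hB : t ∈ pvNumbersB := h
        rw [pvLoopA, if_pos h]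
        rw [show ([] : List String) ++ [t] = [t] from rfl]
        rw [ih2 [t] res (by simp)]
        rw [hnext]
        simp only [List.zip_cons_cons, List.foldl_cons]
        congr 1
        cases hf : (pvNextB ts).1 with
        | none => simp [pvAssignStepB, hB]
        | some w => simp [pvAssignStepB, hB, pv_flush_single]
      · have hB : ¬ t ∈ pvNumbersB := h
        rw [pvLoopA, if_neg h, if_pos rfl]
        rw [ih1 res, hnext]
        simp only [List.zip_cons_cons, List.foldl_cons]
        congr 1
        simp [pvAssignStepB, hB]
    · intro stk res hstk
      by_cases h : t ∈ pvNumbersA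
      · have hB : t ∈ pvNumbersB := h
        rw [pvLoopA, if_pos h]
        rw [ih2 (stk ++ [t]) res (by simp)]
        rw [hnext]
        simp only [List.zip_cons_cons, List.foldl_cons, if_pos hB]
        congr 1
        cases hf : (pvNextB ts).1 with
        | none => simp [pvAssignStepB, hB]
        | some w => simp [pvAssignStepB, hB, pv_flush_append]
      · have hB : ¬ t ∈ pvNumbersB := h
        rw [pvLoopA, if_neg h, if_neg (by simp)]
        rw [ih1 (pvFlushA res stk t), hnext]
        simp only [List.zip_cons_cons, List.foldl_cons, if_neg hB]
        congr 1
        simp [pvAssignStepB, hB]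

theorem pv_zip_eval : List.zip pvVerbFormsA (PySem.List.pyRange 0 4 1) =
    [("third-person singular simple present", (0 : Int)), ("present participle", 1),
     ("simple past", 2), ("past participle", 3)] := by
  rw [show PySem.List.pyRange 0 4 1 = [(0 : Int), 1, 2, 3] from by decide]
  rfl

theorem pv_enum_eval : PySem.List.enumerate pvVerbFormsB =
    [((0 : Int), "third-person singular simple present"), (1, "present participle"),
     (2, "simple past"), (3, "past participle")] := by
  norm_num [pvVerbFormsB, PySem.List.enumerate_cons, PySem.List.enumerate_nil]

theorem pv_toks_eq (s : String) :
    ((PySem.Str.split? (PySem.Str.replace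
        ((List.zip pvVerbFormsA (PySem.List.pyRange 0 4 1)).foldl
          (fun s ci => PySem.Str.replace s ci.1 (PySem.Int.toStr ci.2)) s)
        "and " "") " ").getD []) = pvToksB s := by
  unfold pvToksB
  rw [pv_zip_eval, pv_enum_eval]
  simp only [List.foldl_cons, List.foldl_nil]

-- ===== VERDICT (by name: the statement is the Claim_ definition above) =====
theorem verbParse_spec : Claim_equal_verbParse := by
  intro s _ _
  unfold Spec_verbParse verbParse verbParse_alt
  rw [pv_toks_eq]
  rw [(pv_main (pvToksB s)).1]
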